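-- pv_equiv track=rewrite | github.com/gitfordev2026/MCP-Server-Manager | backend/app/routers/agent.py | _group_tools_by_app
-- ===== SOURCE A (Python) =====
-- from typing import Any, Callable, Optional, List, Dict, Tuple
--
-- def _group_tools_by_app(catalog: List[Dict[str, Any]]) -> Dict[str, List[str]]:
--     grouped: Dict[str, List[str]] = {}
--     for tool in catalog:
--         app = str(tool.get("app", "unknown"))
--         name = str(tool.get("name", ""))
--         if name:
--             grouped.setdefault(app, []).append(name)
--     return grouped
-- ===== SOURCE B (Python) =====
-- def _group_tools_by_app(catalog):
--     # B: index-then-group — build the (app, name) pair list once, dedup the app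
--     # keys in first-occurrence order, then emit each group with one pass per key.
--     pairs = [(str(t.get("app", "unknown")), str(t.get("name", ""))) for t in catalog]
--     pairs = [(a, n) for a, n in pairs if n]
--     apps = list(dict.fromkeys(a for a, _ in pairs))
--     return {a: [n for a2, n in pairs if a2 == a] for a in apps}
-- ===== Notes on version B (the rewrite author's own statement) =====
-- stated objective: alternative
-- what changed: Replaces the incremental setdefault/append hash grouping with an index-then-group pass: build the filtered (app, name) pair list, dedup app keys in first-occurrence order, then collect each group's names by a scan per key.
import Mathlib
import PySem

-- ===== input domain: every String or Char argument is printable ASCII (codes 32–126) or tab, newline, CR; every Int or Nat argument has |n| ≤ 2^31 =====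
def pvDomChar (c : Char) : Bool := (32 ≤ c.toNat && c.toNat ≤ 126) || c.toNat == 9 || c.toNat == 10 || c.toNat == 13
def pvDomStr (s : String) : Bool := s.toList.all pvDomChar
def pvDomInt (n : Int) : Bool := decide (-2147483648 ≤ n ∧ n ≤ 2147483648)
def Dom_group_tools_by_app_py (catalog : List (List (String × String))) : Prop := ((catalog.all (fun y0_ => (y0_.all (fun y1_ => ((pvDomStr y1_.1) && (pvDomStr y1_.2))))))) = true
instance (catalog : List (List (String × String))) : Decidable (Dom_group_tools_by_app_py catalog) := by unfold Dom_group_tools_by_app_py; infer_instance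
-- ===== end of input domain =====

-- B replaces A's incremental setdefault/append grouping by an index-then-group pass
-- (pair list, first-occurrence key dedup, one collecting scan per key): an alternative
-- decomposition of the same cost class, proved to return the identical dict.


-- ===== PORT A =====
-- literal transliteration of A: fold over catalog, setdefault(app, []).append(name)
-- (= Dict.modify app [] (· ++ [name])); tool.get(k, dflt) = Dict.getD; str() on a str is id.
def group_tools_by_app_py (catalog : List (List (String × String))) : List (String × List String) :=
  (catalog.foldl
    (fun (grouped : PySem.Dict String (List String)) tool =>
      let app := (PySem.Dict.mk tool).getD "app" "unknown"
      let name := (PySem.Dict.mk tool).getD "name" ""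
      if name ≠ "" then grouped.modify app [] (· ++ [name]) else grouped)
    PySem.Dict.empty).items

-- ===== PORT B =====
-- literal transliteration of Source B: pair list, filter empty names, dict.fromkeys dedup
-- (= PySem.List.dedup, first occurrences in order), one collecting scan per app key.
def group_tools_by_app_py_alt (catalog : List (List (String × String))) : List (String × List String) :=
  let pairs := (catalog.map
      (fun t => ((PySem.Dict.mk t).getD "app" "unknown", (PySem.Dict.mk t).getD "name" ""))).filter
    (fun p => p.2 ≠ "")
  let apps := PySem.List.dedup (pairs.map Prod.fst)
  apps.map (fun a => (a, (pairs.filter (fun p => p.1 == a)).map Prod.snd))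

-- ===== PRECONDITION & SPEC =====
def Spec_group_tools_by_app_py (catalog : List (List (String × String))) (out : List (String × List String)) : Prop := out = group_tools_by_app_py_alt catalog
instance (catalog : List (List (String × String))) (out : List (String × List String)) : Decidable (Spec_group_tools_by_app_py catalog out) := by unfold Spec_group_tools_by_app_py; infer_instance

-- ===== CLAIM (what is proved, stated in full; the proofs are below) =====
def Claim_equal_group_tools_by_app_py : Prop := ∀ (catalog : List (List (String × String))), Dom_group_tools_by_app_py catalog → Spec_group_tools_by_app_py catalog (group_tools_by_app_py catalog)

-- ===== LEMMAS AND PROOFS =====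

-- A's fold over catalog is the modify-fold over the filtered pair list.
theorem pvFoldA_eq_fold_pairs (catalog : List (List (String × String)))
    (d : PySem.Dict String (List String)) :
    catalog.foldl
      (fun (grouped : PySem.Dict String (List String)) tool =>
        let app := (PySem.Dict.mk tool).getD "app" "unknown"
        let name := (PySem.Dict.mk tool).getD "name" ""
        if name ≠ "" then grouped.modify app [] (· ++ [name]) else grouped) d
    = ((catalog.map
          (fun t => ((PySem.Dict.mk t).getD "app" "unknown", (PySem.Dict.mk t).getD "name" ""))).filter
        (fun p => p.2 ≠ "")).foldl
        (fun grouped p => grouped.modify p.1 [] (· ++ [p.2])) d := by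
  induction catalog generalizing d with
  | nil => rfl
  | cons t rest ih =>
    simp only [ne_eq, ite_not] at ih ⊢
    simp only [List.map_cons, List.filter_cons, List.foldl_cons]
    by_cases h : (PySem.Dict.mk t).getD "name" "" = ""
    · simp only [h, decide_true, Bool.not_true, if_true, decide_not]
      simpa using ih _
    · simp only [h, decide_false, Bool.not_false, if_true, if_false, decide_not]
      simpa [h] using ih _

-- ===== VERDICT (by name: the statement is the Claim_ definition above) =====
theorem group_tools_by_app_py_spec : Claim_equal_group_tools_by_app_py := by
  intro catalog _
  unfold Spec_group_tools_by_app_py group_tools_by_app_py group_tools_by_app_py_alt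
  rw [pvFoldA_eq_fold_pairs]
  set pairs := ((catalog.map
      (fun t => ((PySem.Dict.mk t).getD "app" "unknown", (PySem.Dict.mk t).getD "name" ""))).filter
    (fun p => p.2 ≠ "")) with hp
  set D := pairs.foldl (fun (grouped : PySem.Dict String (List String)) p => grouped.modify p.1 [] (· ++ [p.2])) PySem.Dict.empty with hD
  have hnd : D.keys.Nodup := by
    rw [hD]
    exact PySem.Dict.nodup_keys_foldl_modify_key pairs Prod.fst [] (fun _ p => (· ++ [p.2])) _
      PySem.Dict.nodup_keys_empty
  have hkeys : D.keys = PySem.List.dedup (pairs.map Prod.fst) := by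
    rw [hD, PySem.Dict.keys_foldl_modify_key, PySem.Dict.keys_empty, PySem.List.dedup_eq_ofList]
    rfl
  rw [PySem.Dict.items_eq_map_keys D hnd [], hkeys]
  refine List.map_congr_left ?_
  intro a _
  rw [hD, PySem.Dict.getD_foldl_modify_append, PySem.Dict.getD_empty]
  simp
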